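-- pv_equiv track=rewrite | github.com/AxiomDays/alx-frontend-for-fun | markdown2html.py | mark2header
-- ===== SOURCE A (Python) =====
-- def mark2header(line):
--     count = 0
--     for char in line:
--         if char == "#":
--             count += 1
--             continue
--         elif char == " ":
--             head = "<h{}>".format(count)
--             tail = "<h{}/>".format(count)
--             finalLine = "{}{}{}".format(head, line[(count+1):].rstrip(), tail)
--             return (finalLine)
--             break
--         else:
--             break
-- ===== SOURCE B (Python) =====
-- import re
--
-- def mark2header(line):
--     m = re.match(r'(#*) ', line)
--     if m is None:
--         return None
--     n = len(m.group(1))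
--     return "<h{0}>{1}<h{0}/>".format(n, line[m.end():].rstrip())
-- ===== Notes on version B (the rewrite author's own statement) =====
-- stated objective: idiomatic
-- what changed: Replaces the char-by-char counting loop with early return by a single regex match of the leading '#' run plus one space, then formats the header from the match in one expression.
import Mathlib
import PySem

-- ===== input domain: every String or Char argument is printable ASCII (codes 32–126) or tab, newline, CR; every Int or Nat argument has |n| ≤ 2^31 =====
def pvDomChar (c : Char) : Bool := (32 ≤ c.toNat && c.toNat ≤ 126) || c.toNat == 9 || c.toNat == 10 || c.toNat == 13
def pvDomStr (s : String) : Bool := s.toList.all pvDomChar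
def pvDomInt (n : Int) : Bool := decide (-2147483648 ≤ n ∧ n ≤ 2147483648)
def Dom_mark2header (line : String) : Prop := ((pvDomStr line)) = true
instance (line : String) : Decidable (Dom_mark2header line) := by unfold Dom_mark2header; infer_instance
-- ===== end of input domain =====

-- B parses the heading with a single regex-style match (leading '#' run + one space) instead of A's char-by-char counting loop with early return.


-- ===== PORT A =====
-- literal port of A's for-loop with its count accumulator and early return
def mark2headerGo (line : List Char) (rest : List Char) (count : Int) : Option String :=
  match rest with
  | [] => none
  | c :: rs =>
    if c = '#' then mark2headerGo line rs (count + 1)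
    else if c = ' ' then
      some ("<h" ++ PySem.Int.toStr count ++ ">" ++
            String.ofList (PySem.Chars.rstrip (PySem.List.slice line (some (count + 1)) none)) ++
            "<h" ++ PySem.Int.toStr count ++ "/>")
    else none

def mark2header (line : String) : Option String :=
  mark2headerGo line.toList line.toList 0

-- ===== PORT B =====
-- the regex match r'(#*) ' ported by hand: group(1) is the maximal leading '#' run,
-- and the match succeeds iff the next character is a space (exact: '#' never equals ' ', so no backtracking)
def mark2header_alt (line : String) : Option String :=
  let cs := line.toList
  let n := (cs.takeWhile (· == '#')).length
  match cs.drop n with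
  | ' ' :: rest =>
      some ("<h" ++ PySem.Int.toStr (n : Int) ++ ">" ++
            String.ofList (PySem.Chars.rstrip rest) ++
            "<h" ++ PySem.Int.toStr (n : Int) ++ "/>")
  | _ => none

-- ===== PRECONDITION & SPEC =====
def Spec_mark2header (line : String) (out : Option String) : Prop := out = mark2header_alt line
instance (line : String) (out : Option String) : Decidable (Spec_mark2header line out) := by unfold Spec_mark2header; infer_instance

-- ===== CLAIM (what is proved, stated in full; the proofs are below) =====
def Claim_equal_mark2header : Prop := ∀ (line : String), Dom_mark2header line → Spec_mark2header line (mark2header line)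

-- ===== LEMMAS AND PROOFS =====

-- B's match expression, written out at the list level (what mark2header_alt computes on cs)
def altList (cs : List Char) : Option String :=
  match cs.drop (cs.takeWhile (· == '#')).length with
  | ' ' :: rest =>
      some ("<h" ++ PySem.Int.toStr ((cs.takeWhile (· == '#')).length : Int) ++ ">" ++
            String.ofList (PySem.Chars.rstrip rest) ++
            "<h" ++ PySem.Int.toStr ((cs.takeWhile (· == '#')).length : Int) ++ "/>")
  | _ => none

lemma alt_eq_altList (line : String) : mark2header_alt line = altList line.toList := rfl

lemma takeWhile_hash_append (pre rest : List Char) (hpre : ∀ c ∈ pre, c = '#')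
    (hrest : ∀ c rs, rest = c :: rs → c ≠ '#') :
    (pre ++ rest).takeWhile (· == '#') = pre := by
  induction pre with
  | nil =>
    cases rest with
    | nil => rfl
    | cons c rs =>
      have : c ≠ '#' := hrest c rs rfl
      simp [this]
  | cons p ps ih =>
    have hp : p = '#' := hpre p (by simp)
    have := ih (fun c hc => hpre c (by simp [hc]))
    simp [hp, this]

lemma go_eq (cs : List Char) : ∀ rest pre, (∀ c ∈ pre, c = '#') → cs = pre ++ rest →
    mark2headerGo cs rest (pre.length : Int) = altList cs := by
  intro rest
  induction rest with
  | nil =>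
    intro pre hpre hcs
    have htw : cs.takeWhile (· == '#') = pre := by
      rw [hcs]; exact takeWhile_hash_append pre [] hpre (by intro c rs h; cases h)
    have hdrop : cs.drop pre.length = [] := by rw [hcs]; exact List.drop_left
    simp [mark2headerGo, altList, htw, hdrop]
  | cons c rs ih =>
    intro pre hpre hcs
    by_cases hc : c = '#'
    · have := ih (pre ++ [c]) (by intro x hx; rcases List.mem_append.mp hx with h | h
                                  · exact hpre x h
                                  · simp at h; simp [h, hc]) (by simp [hcs])
      simp only [mark2headerGo, hc, if_true] at *
      simpa using this
    · have htw : cs.takeWhile (· == '#') = pre := by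
        rw [hcs]; exact takeWhile_hash_append pre (c :: rs) hpre
          (by intro c' rs' h; cases h; exact hc)
      have hdrop : cs.drop pre.length = c :: rs := by rw [hcs]; exact List.drop_left
      by_cases hsp : c = ' '
      · have hslice : PySem.List.slice cs (some ((pre.length : Int) + 1)) none = rs := by
          have h1 : ((pre.length : Int) + 1) = ((pre.length + 1 : Nat) : Int) := by push_cast; ring
          rw [h1, PySem.List.slice_from_natCast, hcs, hsp,
              show pre.length + 1 = (pre ++ [' ']).length by simp,
              show pre ++ ' ' :: rs = (pre ++ [' ']) ++ rs by simp]
          exact List.drop_left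
        subst hsp
        simp [mark2headerGo, hc, altList, htw, hdrop, hslice]
      · simp [mark2headerGo, hc, hsp, altList, htw, hdrop]

-- ===== VERDICT (by name: the statement is the Claim_ definition above) =====
theorem mark2header_spec : Claim_equal_mark2header := by
  intro line _
  unfold Spec_mark2header mark2header
  rw [alt_eq_altList]
  simpa using go_eq line.toList line.toList [] (by simp) (by simp)
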